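-- pv_equiv track=rewrite | github.com/bwesterb/iqfit | solve.py | parse_piece_description
-- ===== SOURCE A (Python) =====
-- def parse_piece_description(desc):
--     length = len(desc) // 2
--     maskA, maskB = 0, 0
--     for i in range(length):
--         if desc[i] == 'x':
--             maskA += 2**i
--         maskA += 2**(i+10)
--         maskB += 2**i
--         if desc[i+length] == 'x':
--             maskB += 2**(i+10)
--     return maskA, maskB, length
-- ===== SOURCE B (Python) =====
-- def parse_piece_description(desc):
--     length = len(desc) // 2
--     # Read each half as a binary numeral (most-significant char last), Horner-style.
--     low = 0
--     for c in reversed(desc[:length]):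
--         low = 2 * low + (c == 'x')
--     high = 0
--     for c in reversed(desc[length:2 * length]):
--         high = 2 * high + (c == 'x')
--     full = (1 << length) - 1
--     return low + (full << 10), full + (high << 10), length
-- ===== Notes on version B (the rewrite author's own statement) =====
-- stated objective: faster
-- what changed: Instead of one indexed loop that conditionally adds per-index powers of two into both masks, B reads each half of the string as a binary numeral by Horner's rule over the reversed half (mask = 2*mask + bit, no indices and no power computation) and adds the constant part (1<<length)-1 computed in closed form with one shift.
import Mathlib
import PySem

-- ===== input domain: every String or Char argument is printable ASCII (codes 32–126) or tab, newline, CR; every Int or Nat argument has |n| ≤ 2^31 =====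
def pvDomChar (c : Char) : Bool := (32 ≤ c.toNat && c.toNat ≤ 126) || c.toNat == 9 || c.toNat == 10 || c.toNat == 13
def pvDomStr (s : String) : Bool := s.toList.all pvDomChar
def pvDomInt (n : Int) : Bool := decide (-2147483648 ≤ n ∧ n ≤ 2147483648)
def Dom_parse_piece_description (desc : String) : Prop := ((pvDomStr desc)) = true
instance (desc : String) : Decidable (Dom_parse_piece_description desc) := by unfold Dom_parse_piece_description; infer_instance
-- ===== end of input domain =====

-- B reads each half as a binary numeral by Horner's rule over the reversed half and adds the
-- closed-form constant part (1<<length)-1, avoiding the per-index power computation (objective: faster).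

-- ===== PORT A =====
-- one stateful loop over range(length) maintaining (maskA, maskB)
def parse_piece_description (desc : String) : Int × Int × Int :=
  let length : Int := PySem.Int.floordiv (PySem.Str.len desc) 2
  let st := (PySem.List.pyRange 0 length 1).foldl
    (fun (st : Int × Int) (i : Int) =>
      let mA := if PySem.Str.pyGet? desc i = some 'x' then st.1 + 2 ^ i.toNat else st.1
      let mA := mA + 2 ^ (i + 10).toNat
      let mB := st.2 + 2 ^ i.toNat
      let mB := if PySem.Str.pyGet? desc (i + length) = some 'x' then mB + 2 ^ (i + 10).toNat
                else mB
      (mA, mB)) ((0, 0) : Int × Int)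
  (st.1, st.2, length)

-- ===== PORT B =====
-- 'acc = 0; for c in reversed(half): acc = 2*acc + (c == 'x')'  (True/False added as 1/0)
def pvHorner (l : List Char) : Int :=
  l.reverse.foldl (fun acc c => 2 * acc + (if c = 'x' then 1 else 0)) 0

def parse_piece_description_alt (desc : String) : Int × Int × Int :=
  let cs := desc.toList
  let length := cs.length / 2
  -- desc[:length] and desc[length:2*length]: with 0 ≤ length ≤ 2*length ≤ len(desc)
  -- these slices are exactly take/drop-take, so this is exact here
  let low := pvHorner (cs.take length)
  let high := pvHorner ((cs.drop length).take length)
  let full : Int := 2 ^ length - 1          -- (1 << length) - 1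
  (low + full * 1024, full + high * 1024, (length : Int))  -- x << 10 = x * 1024

-- ===== PRECONDITION & SPEC =====
def Spec_parse_piece_description (desc : String) (out : Int × Int × Int) : Prop := out = parse_piece_description_alt desc
instance (desc : String) (out : Int × Int × Int) : Decidable (Spec_parse_piece_description desc out) := by unfold Spec_parse_piece_description; infer_instance

-- ===== CLAIM (what is proved, stated in full; the proofs are below) =====
def Claim_equal_parse_piece_description : Prop := ∀ (desc : String), Dom_parse_piece_description desc → Spec_parse_piece_description desc (parse_piece_description desc)

-- ===== LEMMAS AND PROOFS =====

theorem pvHorner_foldl_shift (l : List Char) : ∀ a : Int,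
    l.foldl (fun acc c => 2 * acc + (if c = 'x' then 1 else 0)) a
    = a * 2 ^ l.length + l.foldl (fun acc c => 2 * acc + (if c = 'x' then 1 else 0)) 0 := by
  induction l with
  | nil => intro a; simp
  | cons c l ih =>
    intro a
    simp only [List.foldl_cons, List.length_cons]
    rw [ih (2 * a + _), ih (2 * 0 + _)]
    ring

theorem pvHorner_append_singleton (l : List Char) (c : Char) :
    pvHorner (l ++ [c]) = pvHorner l + (if c = 'x' then (2 : Int) ^ l.length else 0) := by
  simp only [pvHorner, List.reverse_append, List.reverse_cons, List.reverse_nil,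
    List.nil_append, List.cons_append, List.foldl_cons]
  rw [pvHorner_foldl_shift]
  simp only [List.length_reverse]
  by_cases h : c = 'x' <;> simp [h] <;> ring

-- the loop of A from 0 to n-1 (with the fixed half-length L), in closed form
theorem pvLoopA (cs : List Char) (L : Nat) (hL : 2 * L ≤ cs.length) :
    ∀ n : Nat, n ≤ L → ∀ a b : Int,
    ((List.range n).map (fun k : Nat => (k : Int))).foldl
      (fun (st : Int × Int) (i : Int) =>
        let mA := if cs[i.toNat]? = some 'x' then st.1 + 2 ^ i.toNat else st.1
        let mA := mA + 2 ^ (i + 10).toNat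
        let mB := st.2 + 2 ^ i.toNat
        let mB := if cs[(i + L).toNat]? = some 'x' then mB + 2 ^ (i + 10).toNat else mB
        (mA, mB)) (a, b)
    = (a + pvHorner (cs.take n) + ((2 : Int) ^ n - 1) * 1024,
       b + ((2 : Int) ^ n - 1) + pvHorner ((cs.drop L).take n) * 1024) := by
  intro n
  induction n with
  | zero => intro _ a b; simp [pvHorner]
  | succ n ih =>
    intro hn a b
    have hn' : n ≤ L := Nat.le_of_succ_le hn
    have hlt : n < cs.length := by omega
    have hlt2 : n + L < cs.length := by omega
    rw [List.range_succ, List.map_append, List.foldl_append, ih hn' a b]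
    have ht1 : cs.take (n + 1) = cs.take n ++ [cs[n]] := by
      rw [List.take_add_one]; simp [List.getElem?_eq_getElem hlt]
    have hdlen : n < (cs.drop L).length := by simp; omega
    have ht2 : (cs.drop L).take (n + 1) = (cs.drop L).take n ++ [(cs.drop L)[n]] := by
      rw [List.take_add_one]; simp [List.getElem?_eq_getElem hdlen]
    have hd : (cs.drop L)[n] = cs[n + L]'hlt2 := by
      simp [List.getElem_drop]; congr 1; omega
    have hlen1 : (cs.take n).length = n := by simp; omega
    have hlen2 : ((cs.drop L).take n).length = n := by simp; omega
    have htn : ((n : Int)).toNat = n := by omega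
    have htn10 : ((n : Int) + 10).toNat = n + 10 := by omega
    have htnL : ((n : Int) + (L : Int)).toNat = n + L := by omega
    simp only [List.map_cons, List.map_nil, List.foldl_cons, List.foldl_nil,
      htn, htn10, htnL, ht1, ht2, pvHorner_append_singleton, hlen1, hlen2, hd,
      List.getElem?_eq_getElem hlt, List.getElem?_eq_getElem hlt2]
    have h1024 : (2 : Int) ^ (n + 10) = 2 ^ n * 1024 := by ring
    by_cases hA : cs[n] = 'x' <;> by_cases hB : cs[n + L]'hlt2 = 'x' <;>
      simp [hA, hB] <;> constructor <;> first | (rw [h1024]; ring) | ring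

-- ===== VERDICT (by name: the statement is the Claim_ definition above) =====
theorem parse_piece_description_spec : Claim_equal_parse_piece_description := by
  intro desc _
  unfold Spec_parse_piece_description parse_piece_description parse_piece_description_alt
  have hlen : PySem.Int.floordiv (PySem.Str.len desc) 2
      = ((desc.toList.length / 2 : Nat) : Int) := by
    rw [PySem.Str.len_eq]
    exact_mod_cast PySem.Int.floordiv_natCast desc.toList.length 2
  simp only [hlen, PySem.List.pyRange_one, Int.sub_zero, Int.toNat_natCast]
  have hmap : (List.range (desc.toList.length / 2)).map (fun k : Nat => (0 : Int) + (k : Int))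
      = (List.range (desc.toList.length / 2)).map (fun k : Nat => (k : Int)) := by
    simp
  rw [hmap]
  have hcongr := PySem.List.foldl_congr_mem
    (l := (List.range (desc.toList.length / 2)).map (fun k : Nat => (k : Int)))
    (init := ((0, 0) : Int × Int))
    (f := fun (st : Int × Int) (i : Int) =>
      let mA := if PySem.Str.pyGet? desc i = some 'x' then st.1 + 2 ^ i.toNat else st.1
      let mA := mA + 2 ^ (i + 10).toNat
      let mB := st.2 + 2 ^ i.toNat
      let mB := if PySem.Str.pyGet? desc (i + ((desc.toList.length / 2 : Nat) : Int)) = some 'x'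
                then mB + 2 ^ (i + 10).toNat else mB
      (mA, mB))
    (g := fun (st : Int × Int) (i : Int) =>
      let mA := if desc.toList[i.toNat]? = some 'x' then st.1 + 2 ^ i.toNat else st.1
      let mA := mA + 2 ^ (i + 10).toNat
      let mB := st.2 + 2 ^ i.toNat
      let mB := if desc.toList[(i + (desc.toList.length / 2 : Nat)).toNat]? = some 'x'
                then mB + 2 ^ (i + 10).toNat else mB
      (mA, mB))
    (by
      intro acc x hx
      simp only [List.mem_map, List.mem_range] at hx
      obtain ⟨k, hk, rfl⟩ := hx
      have h1 : ((k : Int)).toNat = k := by omega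
      have h2 : ((k : Int) + ((desc.toList.length / 2 : Nat) : Int)).toNat
          = k + desc.toList.length / 2 := by omega
      have h3 : (((k : Int)) + 10).toNat = k + 10 := by omega
      have hg1 : PySem.Str.pyGet? desc (k : Int) = desc.toList[k]? := by
        simp only [PySem.Str.pyGet?_natCast]
      have hg2 : PySem.Str.pyGet? desc ((k : Int) + ((desc.toList.length / 2 : Nat) : Int))
          = desc.toList[k + desc.toList.length / 2]? := by
        rw [show ((k : Int) + ((desc.toList.length / 2 : Nat) : Int))
            = ((k + desc.toList.length / 2 : Nat) : Int) by push_cast; ring]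
        simp only [PySem.Str.pyGet?_natCast]
      simp only [h1, h2, h3, hg1, hg2])
  rw [hcongr]
  have hL : 2 * (desc.toList.length / 2) ≤ desc.toList.length := by omega
  have hmain := pvLoopA desc.toList (desc.toList.length / 2) hL
    (desc.toList.length / 2) le_rfl 0 0
  rw [hmain]
  simp only [Prod.mk.injEq, and_true]
  constructor <;> ring
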